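-- pv_equiv track=rewrite | github.com/pypi-data/pypi-mirror-13 | packages/musicode/musicode-0.1.tar.gz/musicode-0.1/musicode.py | load_body
-- ===== SOURCE A (Python) =====
-- def load_body(text):
--     """
--     Load body
--
--     :param str text: music text
--     :rtype: list
--     """
--     body = []
--     rows = []
--
--     for row in get_body(text):
--         rows.append(row.split())
--         if row[0].isdigit() and int(row[0]) > 0:
--             body.append(rows)
--             rows = []
--
--     return body
--
-- def get_body(text):
--     """
--     Get music text body
--
--     :param str text: music text
--     :return:
--     """
--     rows = [row.strip() for row in text.strip().split('\n')]
--     return [row.title() for row in rows if row and ':' not in row]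
-- ===== SOURCE B (Python) =====
-- def get_body(text):
--     rows = [row.strip() for row in text.strip().split('\n')]
--     return [row.title() for row in rows if row and ':' not in row]
--
--
-- def _groups(rows):
--     # find the first boundary row; emit everything up to it as one group, recurse on the rest
--     for i, row in enumerate(rows):
--         if row[0].isdigit() and int(row[0]) > 0:
--             return [[r.split() for r in rows[:i + 1]]] + _groups(rows[i + 1:])
--     return []
--
--
-- def load_body(text):
--     return _groups(get_body(text))
-- ===== Notes on version B (the rewrite author's own statement) =====
-- stated objective: alternative
-- what changed: A carries a pending-rows accumulator and flushes it at each boundary row; B instead recursively finds the index of the first boundary row, slices the group off with rows[:i+1], and recurses on the remainder (the trailing non-boundary rows fall out naturally).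
import Mathlib
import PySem

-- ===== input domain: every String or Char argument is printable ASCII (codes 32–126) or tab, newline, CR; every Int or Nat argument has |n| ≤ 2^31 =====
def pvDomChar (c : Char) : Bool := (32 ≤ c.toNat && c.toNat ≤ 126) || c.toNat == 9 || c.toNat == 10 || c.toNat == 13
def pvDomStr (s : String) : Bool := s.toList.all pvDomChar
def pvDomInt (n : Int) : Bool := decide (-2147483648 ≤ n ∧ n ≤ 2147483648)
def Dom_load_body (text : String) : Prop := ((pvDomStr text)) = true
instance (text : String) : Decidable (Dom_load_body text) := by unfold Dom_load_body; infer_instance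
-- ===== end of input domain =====

-- B replaces A's pending-rows accumulator loop with a recursion that finds the first
-- boundary row and slices the group off (objective: alternative decomposition, same cost).


-- ===== PORT A =====
-- str.title(), ported by hand (no PySem primitive); exact on the ASCII domain,
-- where Python's "cased"/"letter" classes both coincide with isalpha.
def pvTitleChars : List Char → Bool → List Char
  | [], _ => []
  | c :: rest, prevAlpha =>
    (if PySem.Chars.isalpha c then
        (if prevAlpha then PySem.Chars.lowerChar c else PySem.Chars.upperChar c)
      else c) :: pvTitleChars rest (PySem.Chars.isalpha c)

def pvTitle (s : String) : String := String.ofList (pvTitleChars s.toList false)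

-- helper get_body, shared by both Pythons (same-module helper)
def pvGetBody (text : String) : List String :=
  -- split? with sep "\n" ≠ "" always returns some; getD [] is exact here
  let rows := ((PySem.Str.split? (PySem.Str.strip text) "\n").getD []).map PySem.Str.strip
  (rows.filter (fun r => !(r == "") |>.and (!(PySem.Str.isIn ":" r)))).map pvTitle

-- row[0].isdigit() and int(row[0]) > 0  (row is nonempty for every row get_body yields,
-- so the [] branch is unreachable; int of a single ASCII digit never fails)
def pvBoundary (row : String) : Bool :=
  match row.toList with
  | [] => false
  | c :: _ =>
    PySem.Chars.isdigit c &&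
      (match PySem.Int.ofStr? (String.ofList [c]) with
       | some n => n > 0
       | none => false)

def load_body (text : String) : List (List (List String)) :=
  (((pvGetBody text).foldl
      (fun (st : List (List (List String)) × List (List String)) row =>
        let rows := st.2 ++ [PySem.Str.split₀ row]
        if pvBoundary row then (st.1 ++ [rows], ([] : List (List String)))
        else (st.1, rows))
      ([], [])) : List (List (List String)) × List (List String)).1

-- ===== PORT B =====
-- _groups: scan for the first boundary row (the for/enumerate loop = findIdx?),
-- slice the group off, recurse on the remainder; no boundary found → drop the rest.
def pvGroups (rows : List String) : List (List (List String)) :=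
  match h : rows.findIdx? pvBoundary with
  | none => []
  | some i =>
    ((rows.take (i + 1)).map PySem.Str.split₀) :: pvGroups (rows.drop (i + 1))
termination_by rows.length
decreasing_by
  have hi := (List.findIdx?_eq_some_iff_findIdx_eq.mp h).1
  simp [List.length_drop]; omega

def load_body_alt (text : String) : List (List (List String)) :=
  pvGroups (pvGetBody text)

-- ===== PRECONDITION & SPEC =====
def Spec_load_body (text : String) (out : List (List (List String))) : Prop := out = load_body_alt text
instance (text : String) (out : List (List (List String))) : Decidable (Spec_load_body text out) := by unfold Spec_load_body; infer_instance

-- ===== CLAIM (what is proved, stated in full; the proofs are below) =====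
def Claim_equal_load_body : Prop := ∀ (text : String), Dom_load_body text → Spec_load_body text (load_body text)

-- ===== LEMMAS AND PROOFS =====
-- B's recursion, generalised with the pending prefix A carries in its accumulator
def pvGroupsP (pend : List (List String)) (rows : List String) :
    List (List (List String)) :=
  match rows.findIdx? pvBoundary with
  | none => []
  | some i =>
    (pend ++ (rows.take (i + 1)).map PySem.Str.split₀) :: pvGroups (rows.drop (i + 1))

theorem pvGroupsP_nil_eq (rows : List String) : pvGroupsP [] rows = pvGroups rows := by
  rw [pvGroups, pvGroupsP]
  cases h : rows.findIdx? pvBoundary <;> simp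

theorem foldl_eq_groupsP (l : List String) :
    ∀ (b : List (List (List String))) (p : List (List String)),
      ((l.foldl
        (fun (st : List (List (List String)) × List (List String)) row =>
          let rows := st.2 ++ [PySem.Str.split₀ row]
          if pvBoundary row then (st.1 ++ [rows], ([] : List (List String)))
          else (st.1, rows)) (b, p)) : _ × _).1 = b ++ pvGroupsP p l := by
  induction l with
  | nil => intro b p; simp [pvGroupsP]
  | cons r l ih =>
    intro b p
    simp only [List.foldl_cons]
    by_cases hr : pvBoundary r
    · simp only [hr, if_true]
      rw [ih]
      conv_rhs => rw [pvGroupsP, List.findIdx?_cons, hr]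
      simp [pvGroupsP_nil_eq, List.append_assoc]
    · simp only [Bool.not_eq_true] at hr
      simp only [hr, Bool.false_eq_true, if_false]
      rw [ih]
      have hPS : pvGroupsP p (r :: l) = pvGroupsP (p ++ [PySem.Str.split₀ r]) l := by
        rw [pvGroupsP, pvGroupsP, List.findIdx?_cons, hr]
        cases h : l.findIdx? pvBoundary with
        | none => simp
        | some i => simp [List.take_succ_cons, List.map_cons]
      rw [hPS]

-- ===== VERDICT (by name: the statement is the Claim_ definition above) =====
theorem load_body_spec : Claim_equal_load_body := by
  intro text _
  unfold Spec_load_body load_body load_body_alt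
  rw [foldl_eq_groupsP, pvGroupsP_nil_eq]
  simp
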